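-- pv_equiv track=rewrite | github.com/studypaula/FP1-TEO-Ejercicios-del-tema-5 | src/diccionarios.py | indexa_por_iniciales
-- ===== SOURCE A (Python) =====
-- def indexa_por_iniciales(texto: str) -> dict[str, set[str]]:
--     """
--     Construye un diccionario que indexa las distintas palabras del texto
--     (pasado a minúsculas) por sus iniciales.
--
--     Parámetros:
--         texto: Texto del que se van a extraer las palabras.
--
--     Devuelve:
--         Diccionario que asocia a cada inicial el conjunto de palabras
--          que comienzan por dicha inicial.
--
--     """
--     palabras = texto.lower().split()
--     res = {}
--     for p in palabras:
--         inicial = p[0]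
--         if inicial not in res:
--             res[inicial]= set()
--         res[inicial].add(p)
--     return res
-- ===== SOURCE B (Python) =====
-- def indexa_por_iniciales(texto: str) -> dict[str, set[str]]:
--     palabras = texto.lower().split()
--     iniciales = dict.fromkeys(p[0] for p in palabras)
--     return {ini: {p for p in palabras if p[0] == ini} for ini in iniciales}
-- ===== Notes on version B (the rewrite author's own statement) =====
-- stated objective: alternative
-- what changed: Instead of growing a dict of sets word by word, B first collects the distinct initials in order of first appearance and then builds each initial's word set with one filtering comprehension per initial.
import Mathlib
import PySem

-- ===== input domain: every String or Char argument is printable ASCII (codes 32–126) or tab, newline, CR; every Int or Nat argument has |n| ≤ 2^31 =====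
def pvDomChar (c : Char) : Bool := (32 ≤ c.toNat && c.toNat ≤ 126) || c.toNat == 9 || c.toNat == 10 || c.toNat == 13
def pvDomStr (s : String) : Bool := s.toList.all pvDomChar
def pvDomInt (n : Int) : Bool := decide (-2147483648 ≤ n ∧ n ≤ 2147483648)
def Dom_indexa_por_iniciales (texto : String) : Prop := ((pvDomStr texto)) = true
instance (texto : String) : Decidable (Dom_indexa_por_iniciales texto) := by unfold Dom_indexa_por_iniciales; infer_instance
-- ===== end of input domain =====

-- B builds the result by one filtering pass per distinct initial (collected first, in order of
-- first appearance) instead of A's incremental word-by-word dict-of-sets accumulation; alternative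
-- decomposition, same exact value.


-- p[0] as a one-character string (words produced by split() are nonempty, so the index is in range)
def pvIni (p : String) : String := ((PySem.Str.pyGet? p 0).map (fun c => String.ofList [c])).getD ""

-- ===== PORT A =====
def indexa_por_iniciales (texto : String) : List (String × List String) :=
  let palabras := PySem.Str.split₀ (PySem.Str.lower texto)
  let res := palabras.foldl
    (fun (res : PySem.Dict String (PySem.Set String)) p =>
      let inicial := pvIni p
      let res := if res.contains inicial then res else res.insert inicial PySem.Set.empty
      res.modify inicial PySem.Set.empty (fun s => PySem.Set.add s p))
    PySem.Dict.empty
  res.items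

-- ===== PORT B =====
def indexa_por_iniciales_alt (texto : String) : List (String × List String) :=
  let palabras := PySem.Str.split₀ (PySem.Str.lower texto)
  let iniciales := PySem.List.dedup (palabras.map pvIni)
  iniciales.map (fun ini => (ini, PySem.Set.ofList (palabras.filter (fun p => pvIni p == ini))))

-- ===== PRECONDITION & SPEC =====
def Spec_indexa_por_iniciales (texto : String) (out : List (String × List String)) : Prop := out = indexa_por_iniciales_alt texto
instance (texto : String) (out : List (String × List String)) : Decidable (Spec_indexa_por_iniciales texto out) := by unfold Spec_indexa_por_iniciales; infer_instance

-- ===== CLAIM (what is proved, stated in full; the proofs are below) =====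
def Claim_equal_indexa_por_iniciales : Prop := ∀ (texto : String), Dom_indexa_por_iniciales texto → Spec_indexa_por_iniciales texto (indexa_por_iniciales texto)

-- ===== LEMMAS AND PROOFS =====

-- A's loop body equals a single modify-with-default (the 'if missing, insert empty' is absorbed).
lemma step_eq_modify (k : String → String) (d : PySem.Dict String (PySem.Set String)) (p : String) :
    ((if d.contains (k p) then d else d.insert (k p) PySem.Set.empty).modify (k p) PySem.Set.empty
      (fun s => PySem.Set.add s p))
    = d.modify (k p) PySem.Set.empty (fun s => PySem.Set.add s p) := by
  by_cases h : d.contains (k p) = true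
  · simp [h]
  · have h' : d.contains (k p) = false := by simpa using h
    simp only [h, Bool.false_eq_true, if_false, PySem.Dict.modify,
      PySem.Dict.getD_insert_self, PySem.Dict.insert_insert_self]
    rw [PySem.Dict.getD_of_not_contains d _ h']

-- Grouping invariant: A's modify loop produces exactly B's per-initial table.
lemma grouping (k : String → String) (ws : List String) :
    (ws.foldl (fun (d : PySem.Dict String (PySem.Set String)) p =>
        d.modify (k p) PySem.Set.empty (fun s => PySem.Set.add s p)) PySem.Dict.empty).items
    = (PySem.List.dedup (ws.map k)).map
        (fun i => (i, PySem.Set.ofList (ws.filter (fun p => k p == i)))) := by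
  induction ws using List.reverseRecOn with
  | nil => rfl
  | append_singleton ws p ih =>
    rw [List.foldl_append, List.foldl_cons, List.foldl_nil]
    set F := ws.foldl (fun (d : PySem.Dict String (PySem.Set String)) p =>
        d.modify (k p) PySem.Set.empty (fun s => PySem.Set.add s p)) PySem.Dict.empty with hF
    have hkeys : F.keys = PySem.List.dedup (ws.map k) := by
      show F.items.map Prod.fst = _
      rw [ih, List.map_map]
      simp [Function.comp_def, PySem.List.dedup_eq_ofList]
    have hnd : F.keys.Nodup := by rw [hkeys]; exact PySem.List.nodup_dedup _
    have hmod : F.modify (k p) PySem.Set.empty (fun s => PySem.Set.add s p)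
        = F.insert (k p) ((F.getD (k p) PySem.Set.empty).add p) := rfl
    by_cases hmem : k p ∈ ws.map k
    · have hc : F.contains (k p) = true := by
        rw [PySem.Dict.contains_eq_decide_mem_keys, hkeys]
        simp [hmem]
      have hpair : (k p, PySem.Set.ofList (ws.filter (fun q => k q == k p))) ∈ F.items := by
        rw [ih]
        exact List.mem_map_of_mem ((PySem.List.mem_dedup _ _).mpr hmem)
      have hv : F.getD (k p) PySem.Set.empty
          = PySem.Set.ofList (ws.filter (fun q => k q == k p)) :=
        PySem.Dict.getD_of_mem_items F hpair hnd PySem.Set.empty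
      have hded : PySem.List.dedup ((ws ++ [p]).map k) = PySem.List.dedup (ws.map k) := by
        rw [List.map_append, List.map_cons, List.map_nil,
          PySem.List.dedup_eq_ofList, PySem.Set.ofList_append_singleton,
          PySem.Set.add_of_mem, PySem.List.dedup_eq_ofList]
        rw [PySem.Set.mem_ofList]; exact hmem
      rw [hmod, PySem.Dict.items_insert_of_contains F _ hc, ih, List.map_map, hded]
      apply List.map_congr_left
      intro i hi
      by_cases hik : i = k p
      · subst hik
        simp only [Function.comp, beq_self_eq_true, if_pos, hv]
        rw [List.filter_append, List.filter_singleton]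
        simp [PySem.Set.ofList_append_singleton]
      · have hne : (i == k p) = false := by simp [hik]
        simp only [Function.comp, hne, Bool.false_eq_true, if_false]
        rw [List.filter_append]
        have h0 : (k p == i) = false := by simp [Ne.symm hik]
        have : (List.filter (fun q => k q == i) [p]) = [] := by
          rw [List.filter_singleton, h0]; rfl
        rw [this, List.append_nil]
    · have hc : F.contains (k p) = false := by
        rw [PySem.Dict.contains_eq_decide_mem_keys, hkeys]
        simp [hmem]
      have hded : PySem.List.dedup ((ws ++ [p]).map k)
          = PySem.List.dedup (ws.map k) ++ [k p] := by
        rw [List.map_append, List.map_cons, List.map_nil,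
          PySem.List.dedup_eq_ofList, PySem.Set.ofList_append_singleton,
          PySem.Set.add_of_not_mem, PySem.List.dedup_eq_ofList]
        rw [PySem.Set.mem_ofList]; exact hmem
      rw [hmod, PySem.Dict.getD_of_not_contains F PySem.Set.empty hc,
        PySem.Dict.items_insert_of_not_contains F _ hc, ih, hded, List.map_append]
      congr 1
      · apply List.map_congr_left
        intro i hi
        have hik : i ≠ k p := by
          intro h; apply hmem; rw [← h]
          exact (PySem.List.mem_dedup _ _).mp hi
        rw [List.filter_append]
        have h0 : (k p == i) = false := by simp [Ne.symm hik]
        have : (List.filter (fun q => k q == i) [p]) = [] := by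
          rw [List.filter_singleton, h0]; rfl
        rw [this, List.append_nil]
      · have hfil : ws.filter (fun q => k q == k p) = [] := by
          apply List.filter_eq_nil_iff.mpr
          intro q hq h
          exact hmem ((eq_of_beq h) ▸ List.mem_map_of_mem hq)
        rw [List.map_cons, List.map_nil, List.filter_append, hfil, List.nil_append,
          List.filter_singleton]
        simp only [beq_self_eq_true, cond_true]
        rfl

theorem indexa_por_iniciales_spec_aux (texto : String) :
    indexa_por_iniciales texto = indexa_por_iniciales_alt texto := by
  unfold indexa_por_iniciales indexa_por_iniciales_alt
  have hb : (fun (d : PySem.Dict String (PySem.Set String)) p =>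
      (if d.contains (pvIni p) then d else d.insert (pvIni p) PySem.Set.empty).modify (pvIni p)
        PySem.Set.empty (fun s => PySem.Set.add s p))
      = (fun d p => d.modify (pvIni p) PySem.Set.empty (fun s => PySem.Set.add s p)) := by
    funext d p; exact step_eq_modify pvIni d p
  simp only [hb]
  exact grouping pvIni _

-- ===== VERDICT (by name: the statement is the Claim_ definition above) =====
theorem indexa_por_iniciales_spec : Claim_equal_indexa_por_iniciales := by
  intro texto _
  exact indexa_por_iniciales_spec_aux texto
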